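-- pv_equiv track=rewrite | github.com/achabbi/chimeras-NGS | scripts/sequences.py | complete_ends
-- ===== SOURCE A (Python) =====
-- def complete_ends(temp_sequence, parent, temp_raw_alignment, modified_alignment):
--
-- 	raw_alignment = []
-- 	for seq in temp_raw_alignment:
-- 		str_seq = ''
--
-- 		for residue in seq:
-- 			str_seq += str(residue)
--
-- 		raw_alignment.append(str_seq)
--
-- 	if temp_sequence in modified_alignment:
-- 		sequence = ''
-- 		for residue in range(len(temp_sequence)):
-- 			if temp_sequence[residue] == '-':
-- 				for seq in modified_alignment:
-- 					if seq != temp_sequence: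
-- 						if seq[residue] != '-':
-- 							sequence += seq[residue]
-- 							break
-- 			else:
-- 				sequence += temp_sequence[residue]
-- 	else:
-- 		sequence = temp_sequence
--
--
--
-- 	front_index = raw_alignment[0].find(modified_alignment[0])
-- 	end_index = len(modified_alignment[0]) + front_index
--
-- 	front_sequence = raw_alignment[parent][:front_index]
-- 	end_sequence = raw_alignment[parent][end_index:]
--
-- 	temp_sequence = ''.join([front_sequence, sequence, end_sequence])
-- 	new_sequence = temp_sequence.replace('-', '')
-- 	num_residues = len(new_sequence) - len(sequence)
--
-- 	return new_sequence
-- ===== SOURCE B (Python) =====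
-- def complete_ends(temp_sequence, parent, temp_raw_alignment, modified_alignment):
--     # One table-building pass over the rows, then one flat pass over temp_sequence.
--     if temp_sequence in modified_alignment:
--         fill = {}
--         for seq in modified_alignment:
--             if seq != temp_sequence:
--                 for i, ch in enumerate(seq):
--                     if ch != '-' and i not in fill:
--                         fill[i] = ch
--         sequence = ''.join(ch if ch != '-' else fill.get(i, '')
--                            for i, ch in enumerate(temp_sequence))
--     else:
--         sequence = temp_sequence
--     reference = temp_raw_alignment[parent]
--     front_index = temp_raw_alignment[0].find(modified_alignment[0])
--     end_index = front_index + len(modified_alignment[0])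
--     spliced = reference[:front_index] + sequence + reference[end_index:]
--     return spliced.replace('-', '')
-- ===== Notes on version B (the rewrite author's own statement) =====
-- stated objective: faster
-- what changed: B precomputes, in one row-major pass, a column->first-non-gap-character table for the rows differing from temp_sequence, then builds the gap-filled sequence in a single flat pass over temp_sequence, instead of A's per-gap-column rescan of all rows; the splice/strip tail is kept.
import Mathlib
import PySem

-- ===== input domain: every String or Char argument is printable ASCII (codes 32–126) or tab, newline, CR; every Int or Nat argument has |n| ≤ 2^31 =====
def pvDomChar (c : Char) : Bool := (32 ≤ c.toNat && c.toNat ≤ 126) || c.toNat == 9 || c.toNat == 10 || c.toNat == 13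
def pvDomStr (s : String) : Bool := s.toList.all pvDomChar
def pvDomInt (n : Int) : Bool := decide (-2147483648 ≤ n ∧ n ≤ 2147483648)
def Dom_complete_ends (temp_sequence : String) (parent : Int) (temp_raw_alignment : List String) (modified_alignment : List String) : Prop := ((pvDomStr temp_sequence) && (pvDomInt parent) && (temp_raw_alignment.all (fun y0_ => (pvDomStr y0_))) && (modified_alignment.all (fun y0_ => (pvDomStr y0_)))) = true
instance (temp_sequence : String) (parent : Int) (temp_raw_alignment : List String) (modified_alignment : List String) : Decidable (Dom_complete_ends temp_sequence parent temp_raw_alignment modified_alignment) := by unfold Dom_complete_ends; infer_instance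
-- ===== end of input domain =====

-- B replaces A's per-gap-column rescan of all alignment rows by a single row-major
-- pass building a column -> first-non-gap-char table plus one flat pass over the
-- sequence (objective: faster; the splice/strip tail is unchanged).


-- ===== PORT A =====

-- A's inner 'for seq in modified_alignment: … break' at one gap column i
-- (the 'none' arm is where Python raises IndexError; excluded by Pre_).
def ceFillA (rows : List String) (t : String) (i : Int) (acc : List Char) : List Char :=
  match rows with
  | [] => acc
  | seq :: rest =>
    if seq ≠ t then
      match PySem.Str.pyGet? seq i with
      | none => acc
      | some c => if c ≠ '-' then acc ++ [c] else ceFillA rest t i acc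
    else ceFillA rest t i acc

def complete_ends (temp_sequence : String) (parent : Int) (temp_raw_alignment : List String) (modified_alignment : List String) : String :=
  let raw_alignment : List (List Char) :=
    temp_raw_alignment.foldl
      (fun acc seq => acc ++ [seq.toList.foldl (fun a c => a ++ [c]) []]) []
  let sequence : List Char :=
    if temp_sequence ∈ modified_alignment then
      (PySem.List.pyRange 0 (temp_sequence.toList.length : Int) 1).foldl
        (fun s i =>
          match PySem.Str.pyGet? temp_sequence i with
          | none => s
          | some c => if c = '-' then ceFillA modified_alignment temp_sequence i s else s ++ [c]) []
    else temp_sequence.toList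
  let raw0 : List Char := (PySem.List.pyGet? raw_alignment 0).getD []
  let mod0 : List Char := ((PySem.List.pyGet? modified_alignment 0).getD "").toList
  let front_index : Int := PySem.Chars.find raw0 mod0
  let end_index : Int := (mod0.length : Int) + front_index
  let rawP : List Char := (PySem.List.pyGet? raw_alignment parent).getD []
  let front_sequence := PySem.List.slice rawP none (some front_index)
  let end_sequence := PySem.List.slice rawP (some end_index) none
  let temp2 := PySem.Chars.join [] [front_sequence, sequence, end_sequence]
  String.ofList (PySem.Chars.replace temp2 ['-'] [])

-- ===== PORT B =====

-- one table-building step: 'if ch != "-" and i not in fill: fill[i] = ch'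
def ceStep (d : PySem.Dict Int Char) (p : Int × Char) : PySem.Dict Int Char :=
  if p.2 ≠ '-' ∧ d.contains p.1 = false then d.insert p.1 p.2 else d

def ceTable (t : String) (rows : List String) : PySem.Dict Int Char :=
  rows.foldl
    (fun d seq => if seq ≠ t then (PySem.List.enumerate seq.toList 0).foldl ceStep d else d)
    PySem.Dict.empty

def complete_ends_alt (temp_sequence : String) (parent : Int) (temp_raw_alignment : List String) (modified_alignment : List String) : String :=
  let sequence : List Char :=
    if temp_sequence ∈ modified_alignment then
      let fill := ceTable temp_sequence modified_alignment
      (PySem.List.enumerate temp_sequence.toList 0).foldl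
        (fun s p =>
          if p.2 = '-' then
            match fill.get? p.1 with
            | some c => s ++ [c]
            | none => s
          else s ++ [p.2]) []
    else temp_sequence.toList
  let reference : List Char := ((PySem.List.pyGet? temp_raw_alignment parent).getD "").toList
  let raw0 : List Char := ((PySem.List.pyGet? temp_raw_alignment 0).getD "").toList
  let mod0 : List Char := ((PySem.List.pyGet? modified_alignment 0).getD "").toList
  let front_index : Int := PySem.Chars.find raw0 mod0
  let end_index : Int := front_index + (mod0.length : Int)
  let spliced := PySem.List.slice reference none (some front_index) ++ sequence ++
                 PySem.List.slice reference (some end_index) none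
  String.ofList (PySem.Chars.replace spliced ['-'] [])

-- ===== PRECONDITION & SPEC =====

-- Pre_ excludes exactly the inputs on which A raises IndexError: an empty
-- temp_raw_alignment or modified_alignment, a parent index out of range, and (when
-- temp_sequence is a row of modified_alignment) a gap column whose row scan reaches a
-- row shorter than the column, i.e. some too-short row ≠ temp_sequence is not preceded
-- by a row with a non-gap character at that column.
def Pre_complete_ends (temp_sequence : String) (parent : Int) (temp_raw_alignment : List String) (modified_alignment : List String) : Prop :=
  temp_raw_alignment ≠ [] ∧ modified_alignment ≠ [] ∧
  PySem.Raise.InRange temp_raw_alignment.length parent ∧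
  (temp_sequence ∈ modified_alignment →
    ∀ n ∈ List.range temp_sequence.toList.length, temp_sequence.toList[n]? = some '-' →
      ∀ j ∈ List.range modified_alignment.length,
        (modified_alignment[j]?.getD "") ≠ temp_sequence →
        (modified_alignment[j]?.getD "").toList.length ≤ n →
        ∃ k ∈ List.range j, (modified_alignment[k]?.getD "") ≠ temp_sequence ∧
          n < (modified_alignment[k]?.getD "").toList.length ∧
          (modified_alignment[k]?.getD "").toList[n]? ≠ some '-')
instance (temp_sequence : String) (parent : Int) (temp_raw_alignment : List String) (modified_alignment : List String) : Decidable (Pre_complete_ends temp_sequence parent temp_raw_alignment modified_alignment) := by unfold Pre_complete_ends; infer_instance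

def pvWitness_complete_ends : String × Int × List String × List String :=
  ("a--b", -1, ["xxa--byy", "zzzz"], ["a--b", "acdb"])

def Spec_complete_ends (temp_sequence : String) (parent : Int) (temp_raw_alignment : List String) (modified_alignment : List String) (out : String) : Prop := out = complete_ends_alt temp_sequence parent temp_raw_alignment modified_alignment
instance (temp_sequence : String) (parent : Int) (temp_raw_alignment : List String) (modified_alignment : List String) (out : String) : Decidable (Spec_complete_ends temp_sequence parent temp_raw_alignment modified_alignment out) := by unfold Spec_complete_ends; infer_instance

-- ===== CLAIM (what is proved, stated in full; the proofs are below) =====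
def Claim_equal_complete_ends : Prop := ∀ (temp_sequence : String) (parent : Int) (temp_raw_alignment : List String) (modified_alignment : List String), Dom_complete_ends temp_sequence parent temp_raw_alignment modified_alignment → Pre_complete_ends temp_sequence parent temp_raw_alignment modified_alignment → Spec_complete_ends temp_sequence parent temp_raw_alignment modified_alignment (complete_ends temp_sequence parent temp_raw_alignment modified_alignment)
-- ===== LEMMAS AND PROOFS =====

-- 'A's scan at column n returns without indexing past a row' (proof-internal shape of
-- the gap clause of Pre_; see scans_of_pre below)
def Scans (rows : List String) (t : String) (n : Nat) : Prop :=
  match rows with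
  | [] => True
  | seq :: rest =>
    if seq = t then Scans rest t n
    else match seq.toList[n]? with
         | none => False
         | some c => if c = '-' then Scans rest t n else True

-- first non-gap character at column n among rows ≠ t (skipping too-short rows)
def ceFirst (rows : List String) (t : String) (n : Nat) : Option Char :=
  match rows with
  | [] => none
  | seq :: rest =>
    if seq = t then ceFirst rest t n
    else match seq.toList[n]? with
         | none => ceFirst rest t n
         | some c => if c = '-' then ceFirst rest t n else some c

-- first non-gap character of one row, by dict key (enumerate keys start at s)
def rowFF (cs : List Char) (s i : Int) : Option Char :=
  match cs with
  | [] => none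
  | c :: cs => if s = i ∧ c ≠ '-' then some c else rowFF cs (s + 1) i

-- ceFirst over all rows, Int-keyed
def ffInt (rows : List String) (t : String) (i : Int) : Option Char :=
  match rows with
  | [] => none
  | seq :: rest => if seq = t then ffInt rest t i else (rowFF seq.toList 0 i).or (ffInt rest t i)

theorem scans_of_pre (rows : List String) (t : String) (n : Nat)
    (h : ∀ j ∈ List.range rows.length, (rows[j]?.getD "") ≠ t →
        (rows[j]?.getD "").toList.length ≤ n →
        ∃ k ∈ List.range j, (rows[k]?.getD "") ≠ t ∧
          n < (rows[k]?.getD "").toList.length ∧ (rows[k]?.getD "").toList[n]? ≠ some '-') :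
    Scans rows t n := by
  induction rows with
  | nil => trivial
  | cons seq rest ih =>
    have hshift : (seq.toList[n]? = some '-' ∨ seq = t) →
        ∀ j ∈ List.range rest.length, (rest[j]?.getD "") ≠ t →
        (rest[j]?.getD "").toList.length ≤ n →
        ∃ k ∈ List.range j, (rest[k]?.getD "") ≠ t ∧
          n < (rest[k]?.getD "").toList.length ∧ (rest[k]?.getD "").toList[n]? ≠ some '-' := by
      intro hhead j hj hne hle
      have hj' : j + 1 ∈ List.range (seq :: rest).length := by
        simp only [List.mem_range, List.length_cons] at hj ⊢; omega
      have := h (j + 1) hj'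
      rw [List.getElem?_cons_succ] at this
      obtain ⟨k, hk, hkprop⟩ := this hne hle
      have hk' : k < j + 1 := List.mem_range.mp hk
      match k, hk', hkprop with
      | 0, _, hkprop =>
        rw [List.getElem?_cons_zero] at hkprop
        simp only [Option.getD_some] at hkprop
        rcases hhead with hgap | hteq
        · exact absurd hgap hkprop.2.2
        · exact absurd hteq hkprop.1
      | k + 1, hk', hkprop =>
        rw [List.getElem?_cons_succ] at hkprop
        exact ⟨k, List.mem_range.mpr (by omega), hkprop⟩
    rw [Scans]
    by_cases hs : seq = t
    · rw [if_pos hs]; exact ih (hshift (Or.inr hs))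
    · rw [if_neg hs]
      rcases hx : seq.toList[n]? with _ | c
      · have h0 : 0 ∈ List.range (seq :: rest).length := by simp
        have := h 0 h0
        rw [List.getElem?_cons_zero] at this
        simp only [Option.getD_some] at this
        obtain ⟨k, hk, -⟩ := this hs (List.getElem?_eq_none_iff.mp hx)
        exact absurd (List.mem_range.mp hk) (Nat.not_lt_zero k)
      · show if c = '-' then Scans rest t n else True
        by_cases hc : c = '-'
        · rw [if_pos hc]; subst hc
          exact ih (hshift (Or.inl hx))
        · rw [if_neg hc]; trivial

theorem ceFillA_eq (rows : List String) (t : String) (n : Nat) (acc : List Char)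
    (hsc : Scans rows t n) :
    ceFillA rows t (n : Int) acc = acc ++ (ceFirst rows t n).toList := by
  induction rows with
  | nil => simp [ceFillA, ceFirst]
  | cons seq rest ih =>
    rw [ceFillA, ceFirst]
    rw [Scans] at hsc
    by_cases hs : seq = t
    · rw [if_pos hs] at hsc
      simp only [hs, ne_eq, not_true_eq_false, if_false, if_true]
      exact ih hsc
    · rw [if_neg hs] at hsc
      rw [if_pos hs, if_neg hs]
      rcases hx : seq.toList[n]? with _ | c
      · rw [hx] at hsc; exact hsc.elim
      · rw [hx] at hsc
        replace hsc : if c = '-' then Scans rest t n else True := hsc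
        have hg : PySem.Str.pyGet? seq (n : Int) = some c := by
          rw [PySem.Str.pyGet?_natCast, hx]
        rw [hg]
        show (if c ≠ '-' then acc ++ [c] else ceFillA rest t (n : Int) acc) =
          acc ++ (if c = '-' then ceFirst rest t n else some c).toList
        by_cases hc : c = '-'
        · rw [if_pos hc] at hsc
          simp only [hc, ne_eq, not_true_eq_false, ite_false]
          exact ih hsc
        · simp [hc]

theorem rowFF_lt (cs : List Char) (s i : Int) (h : i < s) : rowFF cs s i = none := by
  induction cs generalizing s with
  | nil => rfl
  | cons c cs ih =>
    rw [rowFF, if_neg (by rintro ⟨h', -⟩; omega)]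
    exact ih (s + 1) (by omega)

theorem rowFF_eq (cs : List Char) (s : Int) (n : Nat) :
    rowFF cs s (s + n) =
      (match cs[n]? with
       | none => none
       | some c => if c = '-' then none else some c) := by
  induction cs generalizing s n with
  | nil => simp [rowFF]
  | cons c cs ih =>
    rw [rowFF]
    cases n with
    | zero =>
      by_cases hc : c = '-'
      · simp [hc, rowFF_lt cs (s + 1) s (by omega)]
      · simp [hc]
    | succ n =>
      have hne : ¬ (s = s + ((n : Nat) + 1 : Nat) ∧ c ≠ '-') := by
        push_cast; intro hcon; omega
      rw [if_neg hne]
      have : s + ((n : Nat) + 1 : Nat) = (s + 1) + (n : Nat) := by push_cast; ring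
      rw [this, ih]
      simp

theorem dict_row (cs : List Char) (s : Int) (d : PySem.Dict Int Char) (i : Int) :
    ((PySem.List.enumerate cs s).foldl ceStep d).get? i = (d.get? i).or (rowFF cs s i) := by
  induction cs generalizing s d with
  | nil => simp [rowFF, PySem.List.enumerate_nil]
  | cons c cs ih =>
    rw [PySem.List.enumerate_cons, List.foldl_cons, rowFF]
    by_cases h1 : c = '-'
    · have hstep : ceStep d (s, c) = d := by simp [ceStep, h1]
      rw [hstep, ih, if_neg (by simp [h1])]
    · by_cases h2 : d.contains s = true
      · have hstep : ceStep d (s, c) = d := by simp [ceStep, h1, h2]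
        rw [hstep, ih]
        by_cases hi : s = i
        · subst hi
          have hsome : (d.get? s).isSome = true := by
            rw [← PySem.Dict.contains_eq_isSome_get?]; exact h2
          obtain ⟨v, hv⟩ := Option.isSome_iff_exists.mp hsome
          simp [hv, h1]
        · rw [if_neg (fun hcon => hi hcon.1)]
      · have hstep : ceStep d (s, c) = d.insert s c := by simp [ceStep, h1, h2]
        rw [hstep, ih, PySem.Dict.get?_insert]
        by_cases hi : s = i
        · subst hi
          have hd : d.get? s = none := by
            cases hx : d.get? s with
            | none => rfl
            | some v =>
              exact absurd (by rw [PySem.Dict.contains_eq_isSome_get?, hx]; rfl) h2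
          simp [hd, h1]
        · have hi' : ¬ i = s := fun hcon => hi hcon.symm
          simp [hi, hi']

theorem ceTable_aux (rows : List String) (t : String) (d : PySem.Dict Int Char) (i : Int) :
    ((rows.foldl
        (fun d seq => if seq ≠ t then (PySem.List.enumerate seq.toList 0).foldl ceStep d else d)
        d).get? i) = (d.get? i).or (ffInt rows t i) := by
  induction rows generalizing d with
  | nil => simp [ffInt]
  | cons seq rest ih =>
    rw [List.foldl_cons, ffInt]
    by_cases hs : seq = t
    · rw [if_neg (by simp [hs]), ih, if_pos hs]
    · rw [if_pos hs, if_neg hs, ih, dict_row, Option.or_assoc]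

theorem ffInt_eq_ceFirst (rows : List String) (t : String) (n : Nat) :
    ffInt rows t (n : Int) = ceFirst rows t n := by
  induction rows with
  | nil => rfl
  | cons seq rest ih =>
    rw [ffInt, ceFirst]
    by_cases hs : seq = t
    · simp [hs, ih]
    · rw [if_neg hs, if_neg hs]
      have h0 : rowFF seq.toList 0 (n : Int) =
          (match seq.toList[n]? with
           | none => none
           | some c => if c = '-' then none else some c) := by
        have := rowFF_eq seq.toList 0 n
        rwa [zero_add] at this
      rw [h0]
      cases hx : seq.toList[n]? with
      | none => simp [ih]
      | some c =>
        by_cases hc : c = '-'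
        · simp [hc, ih]
        · simp [hc]

theorem ceTable_get? (t : String) (rows : List String) (n : Nat) :
    (ceTable t rows).get? (n : Int) = ceFirst rows t n := by
  rw [ceTable, ceTable_aux, ffInt_eq_ceFirst]
  simp [PySem.Dict.get?_empty]

theorem sequences_eq (t : String) (rows : List String)
    (hsc : ∀ i : Nat, i < t.toList.length → t.toList[i]? = some '-' → Scans rows t i) :
    ((PySem.List.pyRange 0 (t.toList.length : Int) 1).foldl
        (fun s i =>
          match PySem.Str.pyGet? t i with
          | none => s
          | some c => if c = '-' then ceFillA rows t i s else s ++ [c]) []) =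
    ((PySem.List.enumerate t.toList 0).foldl
        (fun s p =>
          if p.2 = '-' then
            match (ceTable t rows).get? p.1 with
            | some c => s ++ [c]
            | none => s
          else s ++ [p.2]) []) := by
  rw [PySem.List.enumerate_eq_map_pyRange t.toList 'x', PySem.List.pyRange_one,
      PySem.List.pyRange_one, List.foldl_map, List.foldl_map, List.foldl_map]
  have hn : ((t.toList.length : Int) - 0).toNat = t.toList.length := by omega
  have hn' : ((PySem.List.len t.toList) - 0).toNat = t.toList.length := by
    simp [PySem.List.len]
  rw [hn, hn']
  apply PySem.List.foldl_congr_mem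
  intro acc k hk
  have hk' : k < t.toList.length := List.mem_range.mp hk
  have hz : (0 : Int) + (k : Int) = (k : Int) := by omega
  rw [hz]
  have hg : PySem.Str.pyGet? t (k : Int) = some (t.toList[k]'hk') := by
    simp [List.getElem?_eq_getElem hk']
  have hgd : PySem.List.pyGetD t.toList ((k : Int)) 'x' = t.toList[k]'hk' := by
    simp [List.getD_eq_getElem?_getD, List.getElem?_eq_getElem hk']
  rw [hg, hgd]
  by_cases hc : t.toList[k]'hk' = '-'
  · have hfill := ceFillA_eq rows t k acc
      (hsc k hk' (by rw [List.getElem?_eq_getElem hk', hc]))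
    have htab := ceTable_get? t rows k
    simp only [hc, ite_true]
    rw [hfill, htab]
    cases ceFirst rows t k <;> simp
  · simp [hc]

-- ===== VERDICT (by name: the statement is the Claim_ definition above) =====
theorem complete_ends_spec : Claim_equal_complete_ends := by
  intro t parent raw modif hdom hpre
  obtain ⟨h1, h2, h3, h4⟩ := hpre
  show complete_ends t parent raw modif = complete_ends_alt t parent raw modif
  rw [complete_ends, complete_ends_alt]
  have hraw : raw.foldl (fun acc seq => acc ++ [seq.toList.foldl (fun a c => a ++ [c]) []]) ([] : List (List Char))
      = raw.map String.toList := by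
    rw [PySem.List.foldl_append_singleton_eq_map]
    simp only [List.nil_append]
    exact List.map_congr_left (fun seq _ => by
      rw [PySem.List.foldl_append_singleton]; simp)
  rw [hraw]
  have hmap : ∀ i : Int, PySem.List.pyGet? (raw.map String.toList) i
      = (PySem.List.pyGet? raw i).map String.toList := by
    intro i; simp [PySem.List.pyGet?, PySem.List.pyIdx?]
  have hopt : ∀ (o : Option String), (o.map String.toList).getD [] = (o.getD "").toList := by
    intro o; cases o <;> simp
  rw [hmap, hmap, hopt, hopt]
  have hseq : (if t ∈ modif then
      ((PySem.List.pyRange 0 (t.toList.length : Int) 1).foldl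
        (fun s i =>
          match PySem.Str.pyGet? t i with
          | none => s
          | some c => if c = '-' then ceFillA modif t i s else s ++ [c]) [])
      else t.toList) =
      (if t ∈ modif then
        ((PySem.List.enumerate t.toList 0).foldl
          (fun s p =>
            if p.2 = '-' then
              match (ceTable t modif).get? p.1 with
              | some c => s ++ [c]
              | none => s
            else s ++ [p.2]) [])
      else t.toList) := by
    by_cases hm : t ∈ modif
    · rw [if_pos hm, if_pos hm]
      exact sequences_eq t modif
        (fun i hlt hgap => scans_of_pre modif t i (h4 hm i (List.mem_range.mpr hlt) hgap))
    · rw [if_neg hm, if_neg hm]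
  rw [hseq]
  rw [Int.add_comm ((((PySem.List.pyGet? modif 0).getD "").toList.length : Int))]
  simp [PySem.Chars.join, List.intercalate, List.append_assoc]
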